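-- pv_equiv track=rewrite | github.com/simulatedScience/Twisty_Puzzle_Program | tests/state compression tests/state_compression_v2.py | perform_compressed_action
-- ===== SOURCE A (Python) =====
-- def perform_compressed_action(state_int, action, shift_list, state_map):
--     """
--     perform the given action on the given state in-place
--     for twisty puzzles this means applying the permutations of a move
--
--     inputs:
--     -------
--         state - (list) of ints - list representing the state
--         action - (list) of lists of ints - list representing an action, here as a list of cycles
--             cycles are lists of list indices of the state list.
--         power_list - (list) or (tuple) - list of powers of the number n of colors in the puzzle.
--             i.e.: `powerlist = [n*i for i in range(k)]` where k is the number of points in the puzzle.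
--     """
--     for cycle in action: # loop over all cycles in the move
--         state_i = (state_int>>shift_list[cycle[-1]]) & state_map
--         for i in cycle: # apply cycle
--             state_j, state_i = state_i, (state_int>>shift_list[i]) & state_map
--             state_int ^= state_i << shift_list[i]
--             state_int |= state_j << shift_list[i]
--     return state_int
-- ===== SOURCE B (Python) =====
-- def perform_compressed_action(state_int, action, shift_list, state_map):
--     for cycle in action:
--         state_int = _rotate(state_int, cycle,
--                             _field(state_int, cycle[-1], shift_list, state_map),
--                             shift_list, state_map)
--     return state_int
--
-- def _field(state, idx, shift_list, state_map):
--     return (state >> shift_list[idx]) & state_map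
--
-- def _store(state, idx, val, shift_list, state_map):
--     sh = shift_list[idx]
--     return (state & ~(state_map << sh)) | (val << sh)
--
-- def _rotate(state, positions, carry, shift_list, state_map):
--     if not positions:
--         return state
--     head, rest = positions[0], positions[1:]
--     nxt = _field(state, head, shift_list, state_map)
--     return _rotate(_store(state, head, carry, shift_list, state_map), rest, nxt, shift_list, state_map)
-- ===== Notes on version B (the rewrite author's own statement) =====
-- stated objective: alternative
-- what changed: Replaces A's interleaved XOR self-inverse trick with tuple-swap state by explicit field read/store helpers (mask-clear-then-or write) and a recursive carry-passing rotation over each cycle.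
import Mathlib
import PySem

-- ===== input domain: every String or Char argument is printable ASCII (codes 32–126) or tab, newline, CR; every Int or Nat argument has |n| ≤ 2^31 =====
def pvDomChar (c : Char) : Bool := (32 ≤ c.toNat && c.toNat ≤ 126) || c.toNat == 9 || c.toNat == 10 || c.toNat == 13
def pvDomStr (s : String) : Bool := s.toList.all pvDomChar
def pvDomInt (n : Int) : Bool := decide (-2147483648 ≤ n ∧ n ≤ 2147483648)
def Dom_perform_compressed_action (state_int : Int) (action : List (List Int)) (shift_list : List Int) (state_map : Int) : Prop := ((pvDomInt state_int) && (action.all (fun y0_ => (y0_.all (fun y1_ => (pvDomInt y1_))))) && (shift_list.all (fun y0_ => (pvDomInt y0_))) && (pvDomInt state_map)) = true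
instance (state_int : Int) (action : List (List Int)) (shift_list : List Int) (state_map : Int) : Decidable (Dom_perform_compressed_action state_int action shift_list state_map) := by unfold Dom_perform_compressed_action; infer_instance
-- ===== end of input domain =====

-- B replaces A's interleaved XOR self-inverse rotation (tuple-swap state) by explicit
-- field read/store helpers (mask-clear-then-or write) and a recursive carry-passing
-- rotation per cycle; equivalence is proved on all inputs where the Python A returns.

-- ===== PORT A =====
-- one iteration of A's inner `for i in cycle` loop over the state pair (state_int, state_i)
def pvAStep (shift_list : List Int) (state_map : Int) (p : Int × Int) (i : Int) : Int × Int :=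
  let sh := (PySem.List.pyGetD shift_list i 0).toNat
  let state_j := p.2
  let state_i := PySem.Int.band (p.1 >>> sh) state_map
  (PySem.Int.bor (PySem.Int.bxor p.1 (state_i <<< sh)) (state_j <<< sh), state_i)

def perform_compressed_action (state_int : Int) (action : List (List Int)) (shift_list : List Int) (state_map : Int) : Int :=
  action.foldl (fun st cycle =>
    let s0 := PySem.Int.band
      (st >>> (PySem.List.pyGetD shift_list (PySem.List.pyGetD cycle (-1) 0) 0).toNat) state_map
    (cycle.foldl (pvAStep shift_list state_map) (st, s0)).1) state_int

-- ===== PORT B =====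
-- Source B `_field`: read the field of `state` addressed by `shift_list[idx]`
def pvField (state : Int) (idx : Int) (shift_list : List Int) (state_map : Int) : Int :=
  PySem.Int.band (state >>> (PySem.List.pyGetD shift_list idx 0).toNat) state_map

-- Source B `_store`: clear the field with & ~(mask << sh), then or the value in
def pvStore (state : Int) (idx : Int) (val : Int) (shift_list : List Int) (state_map : Int) : Int :=
  let sh := (PySem.List.pyGetD shift_list idx 0).toNat
  PySem.Int.bor (PySem.Int.band state (Int.not (state_map <<< sh))) (val <<< sh)

-- Source B `_rotate`: recursive carry-passing rotation along the cycle
def pvRotate (state : Int) (positions : List Int) (carry : Int) (shift_list : List Int) (state_map : Int) : Int :=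
  match positions with
  | [] => state
  | head :: rest =>
      pvRotate (pvStore state head carry shift_list state_map) rest
        (pvField state head shift_list state_map) shift_list state_map

def perform_compressed_action_alt (state_int : Int) (action : List (List Int)) (shift_list : List Int) (state_map : Int) : Int :=
  action.foldl (fun st cycle =>
    pvRotate st cycle (pvField st (PySem.List.pyGetD cycle (-1) 0) shift_list state_map)
      shift_list state_map) state_int

-- ===== PRECONDITION & SPEC =====
-- Pre_ excludes exactly the inputs where the Python A raises: an empty cycle (IndexError on
-- cycle[-1]), a cycle index out of range for shift_list (IndexError), or a negative shift
-- value (ValueError on << / >>).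
def Pre_perform_compressed_action (state_int : Int) (action : List (List Int)) (shift_list : List Int) (state_map : Int) : Prop :=
  ∀ cycle ∈ action, cycle ≠ [] ∧
    ∀ i ∈ cycle, PySem.Raise.InRange shift_list.length i ∧ 0 ≤ PySem.List.pyGetD shift_list i 0
instance (state_int : Int) (action : List (List Int)) (shift_list : List Int) (state_map : Int) : Decidable (Pre_perform_compressed_action state_int action shift_list state_map) := by unfold Pre_perform_compressed_action; infer_instance

def pvWitness_perform_compressed_action : Int × List (List Int) × List Int × Int :=
  (5, [[0, 1]], [0, 2], 3)

def Spec_perform_compressed_action (state_int : Int) (action : List (List Int)) (shift_list : List Int) (state_map : Int) (out : Int) : Prop := out = perform_compressed_action_alt state_int action shift_list state_map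
instance (state_int : Int) (action : List (List Int)) (shift_list : List Int) (state_map : Int) (out : Int) : Decidable (Spec_perform_compressed_action state_int action shift_list state_map out) := by unfold Spec_perform_compressed_action; infer_instance

-- ===== CLAIM (what is proved, stated in full; the proofs are below) =====
def Claim_equal_perform_compressed_action : Prop := ∀ (state_int : Int) (action : List (List Int)) (shift_list : List Int) (state_map : Int), Dom_perform_compressed_action state_int action shift_list state_map → Pre_perform_compressed_action state_int action shift_list state_map → Spec_perform_compressed_action state_int action shift_list state_map (perform_compressed_action state_int action shift_list state_map)

-- ===== LEMMAS AND PROOFS =====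

-- Nat bit facts ---------------------------------------------------------------

lemma pv_ldiff_div_two (m n : Nat) : (m.ldiff n) / 2 = (m / 2).ldiff (n / 2) := by
  apply Nat.eq_of_testBit_eq
  intro k
  simp [Nat.testBit_div_two, Nat.testBit_ldiff]

lemma pv_zero_ldiff (n : Nat) : Nat.ldiff 0 n = 0 := by
  apply Nat.eq_of_testBit_eq
  intro k
  simp [Nat.testBit_ldiff]

lemma pv_and_add_ldiff (m n : Nat) : (m &&& n) + m.ldiff n = m := by
  induction m using Nat.div2Induction generalizing n with
  | ind m ih =>
    rcases Nat.eq_zero_or_pos m with h0 | hpos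
    · subst h0; simp [Nat.zero_and, pv_zero_ldiff]
    · have h2 : (m / 2 &&& n / 2) + (m / 2).ldiff (n / 2) = m / 2 := ih hpos (n / 2)
      have ha : (m &&& n) / 2 = m / 2 &&& n / 2 := Nat.and_div_two
      have hl : (m.ldiff n) / 2 = (m / 2).ldiff (n / 2) := pv_ldiff_div_two m n
      have hpar : (m &&& n) % 2 + (m.ldiff n) % 2 = m % 2 := by
        have t1 : (m &&& n).testBit 0 = (m.testBit 0 && n.testBit 0) := Nat.testBit_and ..
        have t2 : (m.ldiff n).testBit 0 = (m.testBit 0 && !n.testBit 0) := Nat.testBit_ldiff ..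
        simp only [Nat.testBit_zero] at t1 t2
        rw [← decide_not, ← Bool.decide_and] at t2
        rw [← Bool.decide_and] at t1
        rw [decide_eq_decide] at t1 t2
        omega
      omega

lemma pv_sub_and_eq_ldiff (m n : Nat) : m - (m &&& n) = m.ldiff n := by
  have h := pv_and_add_ldiff m n
  omega

-- bridges between Int constructors and the arithmetic in the PySem definitions

lemma pv_negSucc_eq_neg_sub_one (k : Nat) : Int.negSucc k = -(k : Int) - 1 := by
  rw [Int.negSucc_eq]; ring

lemma pv_ofNat_nonneg (m : Nat) : (0 : Int) ≤ Int.ofNat m := Int.ofNat_le.mpr (Nat.zero_le m)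

lemma pv_negSucc_not_nonneg (m : Nat) : ¬ (0 : Int) ≤ Int.negSucc m := by
  rw [Int.negSucc_eq]; omega

lemma pv_toNat_ofNat (m : Nat) : (Int.ofNat m).toNat = m := rfl

lemma pv_neg_negSucc_sub_one (n : Nat) : -(Int.negSucc n) - 1 = (n : Int) := by
  rw [Int.negSucc_eq]; ring

lemma pv_toNat_compl (n : Nat) : (-(Int.negSucc n) - 1).toNat = n := by
  rw [pv_neg_negSucc_sub_one]; exact Int.toNat_natCast n

lemma pv_testBit_ofNat (x : Nat) (k : Nat) : (Int.ofNat x).testBit k = x.testBit k := rfl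

lemma pv_testBit_negSucc (x : Nat) (k : Nat) : (Int.negSucc x).testBit k = !(x.testBit k) := rfl

lemma pv_testBit_natCast (x : Nat) (k : Nat) : ((x : Int)).testBit k = x.testBit k := rfl

-- testBit characterisation of the PySem / core Int bit operations -------------

lemma pv_testBit_band (a b : Int) (k : Nat) :
    (PySem.Int.band a b).testBit k = (a.testBit k && b.testBit k) := by
  cases a with
  | ofNat m =>
    cases b with
    | ofNat n =>
      rw [PySem.Int.band, if_pos (pv_ofNat_nonneg m), if_pos (pv_ofNat_nonneg n)]
      simp only [pv_toNat_ofNat, pv_testBit_natCast, pv_testBit_ofNat, Nat.testBit_and]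
    | negSucc n =>
      rw [PySem.Int.band, if_pos (pv_ofNat_nonneg m), if_neg (pv_negSucc_not_nonneg n)]
      simp only [pv_toNat_ofNat, pv_toNat_compl, pv_sub_and_eq_ldiff, pv_testBit_natCast,
        pv_testBit_ofNat, pv_testBit_negSucc, Nat.testBit_ldiff]
  | negSucc m =>
    cases b with
    | ofNat n =>
      rw [PySem.Int.band, if_neg (pv_negSucc_not_nonneg m), if_pos (pv_ofNat_nonneg n)]
      simp only [pv_toNat_ofNat, pv_toNat_compl, pv_sub_and_eq_ldiff, pv_testBit_natCast,
        pv_testBit_ofNat, pv_testBit_negSucc, Nat.testBit_ldiff]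
      cases m.testBit k <;> cases n.testBit k <;> rfl
    | negSucc n =>
      rw [PySem.Int.band, if_neg (pv_negSucc_not_nonneg m), if_neg (pv_negSucc_not_nonneg n)]
      simp only [pv_toNat_compl, ← pv_negSucc_eq_neg_sub_one, pv_testBit_negSucc,
        Nat.testBit_or]
      cases m.testBit k <;> cases n.testBit k <;> rfl

lemma pv_testBit_bxor (a b : Int) (k : Nat) :
    (PySem.Int.bxor a b).testBit k = xor (a.testBit k) (b.testBit k) := by
  cases a with
  | ofNat m =>
    cases b with
    | ofNat n =>
      rw [PySem.Int.bxor, if_pos (pv_ofNat_nonneg m), if_pos (pv_ofNat_nonneg n)]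
      simp only [pv_toNat_ofNat, pv_testBit_natCast, pv_testBit_ofNat, Nat.testBit_xor]
    | negSucc n =>
      rw [PySem.Int.bxor, if_pos (pv_ofNat_nonneg m), if_neg (pv_negSucc_not_nonneg n)]
      simp only [pv_toNat_ofNat, pv_toNat_compl, ← pv_negSucc_eq_neg_sub_one,
        pv_testBit_natCast, pv_testBit_ofNat, pv_testBit_negSucc, Nat.testBit_xor]
      cases m.testBit k <;> cases n.testBit k <;> rfl
  | negSucc m =>
    cases b with
    | ofNat n =>
      rw [PySem.Int.bxor, if_neg (pv_negSucc_not_nonneg m), if_pos (pv_ofNat_nonneg n)]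
      simp only [pv_toNat_ofNat, pv_toNat_compl, ← pv_negSucc_eq_neg_sub_one,
        pv_testBit_natCast, pv_testBit_ofNat, pv_testBit_negSucc, Nat.testBit_xor]
      cases m.testBit k <;> cases n.testBit k <;> rfl
    | negSucc n =>
      rw [PySem.Int.bxor, if_neg (pv_negSucc_not_nonneg m), if_neg (pv_negSucc_not_nonneg n)]
      simp only [pv_toNat_compl, pv_testBit_natCast, pv_testBit_ofNat, pv_testBit_negSucc,
        Nat.testBit_xor]
      cases m.testBit k <;> cases n.testBit k <;> rfl

lemma pv_testBit_not (a : Int) (k : Nat) : (Int.not a).testBit k = !(a.testBit k) := by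
  cases a with
  | ofNat m =>
    show (Int.negSucc m).testBit k = _
    rw [pv_testBit_negSucc, pv_testBit_ofNat]
  | negSucc m =>
    show (Int.ofNat m).testBit k = _
    rw [pv_testBit_negSucc, pv_testBit_ofNat, Bool.not_not]

lemma pv_testBit_pred_shift (n : Nat) : ∀ (s k : Nat),
    ((n + 1) <<< s - 1).testBit k = (decide (k < s) || n.testBit (k - s)) := by
  intro s
  induction s with
  | zero => intro k; simp [Nat.shiftLeft_eq]
  | succ s ih =>
    intro k
    have hpos : 0 < (n + 1) <<< s := by
      rw [Nat.shiftLeft_eq]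
      exact Nat.mul_pos (Nat.succ_pos n) (Nat.two_pow_pos s)
    have hsucc : (n + 1) <<< (s + 1) = 2 * ((n + 1) <<< s) := by
      rw [Nat.shiftLeft_eq, Nat.shiftLeft_eq, pow_succ]; ring
    have hrw : (n + 1) <<< (s + 1) - 1 = 2 * ((n + 1) <<< s - 1) + 1 := by omega
    rw [hrw]
    cases k with
    | zero =>
      rw [Nat.testBit_zero]
      simp [Nat.mul_add_mod]
    | succ k =>
      have hdiv : (2 * ((n + 1) <<< s - 1) + 1) / 2 = (n + 1) <<< s - 1 := by omega
      rw [← Nat.testBit_div_two, hdiv, ih k]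
      have h2 : k + 1 - (s + 1) = k - s := by omega
      rw [h2]
      by_cases hk : k < s <;> simp [hk, Nat.succ_lt_succ_iff]

lemma pv_testBit_shiftLeft (x : Int) (n k : Nat) :
    (x <<< n).testBit k = (decide (n ≤ k) && x.testBit (k - n)) := by
  cases x with
  | ofNat m =>
    show (Int.ofNat (m <<< n)).testBit k = _
    rw [pv_testBit_ofNat, pv_testBit_ofNat, Nat.testBit_shiftLeft]
  | negSucc m =>
    show (Int.negSucc ((m + 1) <<< n - 1)).testBit k = _
    rw [pv_testBit_negSucc, pv_testBit_negSucc, pv_testBit_pred_shift]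
    by_cases h : n ≤ k
    · have : ¬ (k < n) := by omega
      simp [h, this]
    · have : k < n := by omega
      simp [h, this]

lemma pv_testBit_shiftRight (x : Int) (n k : Nat) :
    (x >>> n).testBit k = x.testBit (n + k) := by
  cases x with
  | ofNat m =>
    show (Int.ofNat (m >>> n)).testBit k = _
    rw [pv_testBit_ofNat, pv_testBit_ofNat, Nat.testBit_shiftRight]
  | negSucc m =>
    show (Int.negSucc (m >>> n)).testBit k = _
    rw [pv_testBit_negSucc, pv_testBit_negSucc, Nat.testBit_shiftRight]

lemma pv_int_ext (a b : Int) (h : ∀ k, a.testBit k = b.testBit k) : a = b := by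
  cases a with
  | ofNat m =>
    cases b with
    | ofNat n =>
      have : m = n := Nat.eq_of_testBit_eq fun k => by
        have := h k; rwa [pv_testBit_ofNat, pv_testBit_ofNat] at this
      rw [this]
    | negSucc n =>
      exfalso
      have hk := h (m + n)
      rw [pv_testBit_ofNat, pv_testBit_negSucc] at hk
      have hm : m.testBit (m + n) = false := by
        apply Nat.testBit_lt_two_pow
        have := @Nat.lt_two_pow_self (m + n); omega
      have hn : n.testBit (m + n) = false := by
        apply Nat.testBit_lt_two_pow
        have := @Nat.lt_two_pow_self (m + n); omega
      rw [hm, hn] at hk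
      exact absurd hk (by simp)
  | negSucc m =>
    cases b with
    | ofNat n =>
      exfalso
      have hk := h (m + n)
      rw [pv_testBit_ofNat, pv_testBit_negSucc] at hk
      have hm : m.testBit (m + n) = false := by
        apply Nat.testBit_lt_two_pow
        have := @Nat.lt_two_pow_self (m + n); omega
      have hn : n.testBit (m + n) = false := by
        apply Nat.testBit_lt_two_pow
        have := @Nat.lt_two_pow_self (m + n); omega
      rw [hm, hn] at hk
      exact absurd hk (by simp)
    | negSucc n =>
      have : m = n := Nat.eq_of_testBit_eq fun k => by
        have := h k; rw [pv_testBit_negSucc, pv_testBit_negSucc] at this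
        exact Bool.not_inj this
      rw [this]

-- the KEY step identity: XOR-clearing the field equals mask-clearing it -------

lemma pv_key (x m : Int) (n : Nat) :
    PySem.Int.bxor x ((PySem.Int.band (x >>> n) m) <<< n)
      = PySem.Int.band x (Int.not (m <<< n)) := by
  apply pv_int_ext
  intro k
  rw [pv_testBit_bxor, pv_testBit_band, pv_testBit_not, pv_testBit_shiftLeft,
      pv_testBit_shiftLeft, pv_testBit_band, pv_testBit_shiftRight]
  by_cases hnk : n ≤ k
  · have hnn : n + (k - n) = k := by omega
    rw [hnn]
    simp only [hnk, decide_true, Bool.true_and]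
    cases x.testBit k <;> cases m.testBit (k - n) <;> rfl
  · simp only [hnk, decide_false, Bool.false_and]
    cases x.testBit k <;> rfl

-- A's step equals B's store ---------------------------------------------------

lemma pv_step_fst (shift_list : List Int) (state_map : Int) (st carry i : Int) :
    (pvAStep shift_list state_map (st, carry) i).1
      = pvStore st i carry shift_list state_map := by
  simp only [pvAStep, pvStore]
  rw [pv_key]

lemma pv_step_snd (shift_list : List Int) (state_map : Int) (st carry i : Int) :
    (pvAStep shift_list state_map (st, carry) i).2
      = pvField st i shift_list state_map := rfl

-- A's inner fold equals B's recursion -----------------------------------------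

lemma pv_fold_eq_rotate (shift_list : List Int) (state_map : Int) :
    ∀ (cycle : List Int) (st carry : Int),
      (cycle.foldl (pvAStep shift_list state_map) (st, carry)).1
        = pvRotate st cycle carry shift_list state_map := by
  intro cycle
  induction cycle with
  | nil => intro st carry; rfl
  | cons head rest ih =>
      intro st carry
      simp only [List.foldl_cons, pvRotate]
      have hstep : pvAStep shift_list state_map (st, carry) head
          = (pvStore st head carry shift_list state_map,
             pvField st head shift_list state_map) := by
        refine Prod.ext ?_ ?_
        · exact pv_step_fst shift_list state_map st carry head
        · exact pv_step_snd shift_list state_map st carry head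
      rw [hstep, ih]

-- the two whole programs agree ------------------------------------------------

lemma pv_programs_eq (shift_list : List Int) (state_map : Int) :
    ∀ (action : List (List Int)) (st : Int),
      perform_compressed_action st action shift_list state_map
        = perform_compressed_action_alt st action shift_list state_map := by
  intro action
  induction action with
  | nil => intro st; rfl
  | cons c cs ih =>
      intro st
      have h1 := ih (pvRotate st c
        (pvField st (PySem.List.pyGetD c (-1) 0) shift_list state_map) shift_list state_map)
      simp only [perform_compressed_action, perform_compressed_action_alt,
        List.foldl_cons] at h1 ⊢
      rw [pv_fold_eq_rotate]
      exact h1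

-- ===== VERDICT (by name: the statement is the Claim_ definition above) =====
theorem perform_compressed_action_spec : Claim_equal_perform_compressed_action := by
  intro state_int action shift_list state_map _ _
  exact pv_programs_eq shift_list state_map action state_int
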